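-- pv_equiv track=rewrite | github.com/CnuJimin/codeTree_Algorithm | 250317/Carry 피하기 2/escaping-carry-2.py | isCarry
-- ===== SOURCE A (Python) =====
-- def splits(num):
--     result = []
--     result.append((num % 100000) // 10000)
--     result.append((num % 10000) // 1000)
--     result.append((num % 1000) // 100)
--     result.append((num % 100) // 10)
--     result.append((num % 10) // 1)
--     return result
--
-- def isCarry(x,y,z):
--     x_arr = splits(x)
--     y_arr = splits(y)
--     z_arr = splits(z)
--
--     for i in range(5):
--         if x_arr[i] + y_arr[i] + z_arr[i] >= 10 :
--             return True
--
--     return False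
-- ===== SOURCE B (Python) =====
-- def isCarry(x, y, z):
--     for _ in range(5):
--         if x % 10 + y % 10 + z % 10 >= 10:
--             return True
--         x //= 10
--         y //= 10
--         z //= 10
--     return False
-- ===== Notes on version B (the rewrite author's own statement) =====
-- stated objective: simpler
-- what changed: Drops the splits helper and the three precomputed 5-digit lists; instead keeps three running quotients, testing x%10+y%10+z%10 each round and peeling one digit with //=10.
import Mathlib
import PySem

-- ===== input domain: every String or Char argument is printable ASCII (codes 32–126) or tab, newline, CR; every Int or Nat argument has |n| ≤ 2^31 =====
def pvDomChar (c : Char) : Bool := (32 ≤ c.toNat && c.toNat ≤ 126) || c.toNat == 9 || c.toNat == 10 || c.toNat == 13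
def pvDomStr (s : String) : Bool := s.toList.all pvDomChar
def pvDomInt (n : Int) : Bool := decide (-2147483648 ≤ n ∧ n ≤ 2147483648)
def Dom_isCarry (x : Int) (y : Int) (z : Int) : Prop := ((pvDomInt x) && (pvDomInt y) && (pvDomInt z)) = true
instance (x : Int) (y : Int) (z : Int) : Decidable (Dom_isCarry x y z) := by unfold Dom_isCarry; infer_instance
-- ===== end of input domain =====

-- B drops the splits helper and the three 5-digit lists, keeping three running quotients
-- and peeling one digit per round (simpler decomposition; same O(1) cost).

-- ===== PORT A =====
-- splits(num): builds the list of the five lowest decimal digits, most significant first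
def splitsPort (num : Int) : List Int :=
  let result : List Int := []
  let result := result ++ [PySem.Int.floordiv (PySem.Int.mod num 100000) 10000]
  let result := result ++ [PySem.Int.floordiv (PySem.Int.mod num 10000) 1000]
  let result := result ++ [PySem.Int.floordiv (PySem.Int.mod num 1000) 100]
  let result := result ++ [PySem.Int.floordiv (PySem.Int.mod num 100) 10]
  let result := result ++ [PySem.Int.floordiv (PySem.Int.mod num 10) 1]
  result

-- the for-loop with early 'return True' is the disjunction over range(5);
-- indices 0..4 are always in range of the length-5 lists, so pyGetD's default is never used
def isCarry (x : Int) (y : Int) (z : Int) : Bool :=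
  let x_arr := splitsPort x
  let y_arr := splitsPort y
  let z_arr := splitsPort z
  (PySem.List.pyRange 0 5 1).any (fun i =>
    decide (PySem.List.pyGetD x_arr i 0 + PySem.List.pyGetD y_arr i 0 + PySem.List.pyGetD z_arr i 0 ≥ 10))

-- ===== PORT B =====
-- the 5-iteration loop of Source B: test the current lowest digits, then peel one digit
def altLoop : Nat → Int → Int → Int → Bool
  | 0, _, _, _ => false
  | n + 1, x, y, z =>
    if PySem.Int.mod x 10 + PySem.Int.mod y 10 + PySem.Int.mod z 10 ≥ 10 then true
    else altLoop n (PySem.Int.floordiv x 10) (PySem.Int.floordiv y 10) (PySem.Int.floordiv z 10)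

def isCarry_alt (x : Int) (y : Int) (z : Int) : Bool := altLoop 5 x y z

-- ===== PRECONDITION & SPEC =====
def Spec_isCarry (x : Int) (y : Int) (z : Int) (out : Bool) : Prop := out = isCarry_alt x y z
instance (x : Int) (y : Int) (z : Int) (out : Bool) : Decidable (Spec_isCarry x y z out) := by unfold Spec_isCarry; infer_instance

-- ===== CLAIM (what is proved, stated in full; the proofs are below) =====
def Claim_equal_isCarry : Prop := ∀ (x : Int) (y : Int) (z : Int), Dom_isCarry x y z → Spec_isCarry x y z (isCarry x y z)

-- ===== LEMMAS AND PROOFS =====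
-- each lemma: extracting digit i by A's modulo-then-divide equals B's divide-then-modulo
theorem dig1 (n : Int) : n % 100 / 10 = n / 10 % 10 := by omega
theorem dig2 (n : Int) : n % 1000 / 100 = n / 10 / 10 % 10 := by omega
theorem dig3 (n : Int) : n % 10000 / 1000 = n / 10 / 10 / 10 % 10 := by omega
theorem dig4 (n : Int) : n % 100000 / 10000 = n / 10 / 10 / 10 / 10 % 10 := by omega

-- ===== VERDICT (by name: the statement is the Claim_ definition above) =====
theorem isCarry_spec : Claim_equal_isCarry := by
  intro x y z _
  unfold Spec_isCarry isCarry isCarry_alt splitsPort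
  simp only [altLoop]
  rw [show PySem.List.pyRange 0 5 = [0,1,2,3,4] from by decide]
  simp only [PySem.Int.mod_eq_emod_of_pos (by norm_num : (0:Int) < 10),
    PySem.Int.mod_eq_emod_of_pos (by norm_num : (0:Int) < 100),
    PySem.Int.mod_eq_emod_of_pos (by norm_num : (0:Int) < 1000),
    PySem.Int.mod_eq_emod_of_pos (by norm_num : (0:Int) < 10000),
    PySem.Int.mod_eq_emod_of_pos (by norm_num : (0:Int) < 100000),
    PySem.Int.floordiv_eq_ediv_of_pos (by norm_num : (0:Int) < 1),
    PySem.Int.floordiv_eq_ediv_of_pos (by norm_num : (0:Int) < 10),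
    PySem.Int.floordiv_eq_ediv_of_pos (by norm_num : (0:Int) < 100),
    PySem.Int.floordiv_eq_ediv_of_pos (by norm_num : (0:Int) < 1000),
    PySem.Int.floordiv_eq_ediv_of_pos (by norm_num : (0:Int) < 10000),
    List.nil_append, List.cons_append]
  simp only [List.any_cons, List.any_nil, PySem.List.pyGetD_ofNat']
  simp only [List.getD_cons_zero, List.getD_cons_succ]
  rw [Bool.eq_iff_iff]
  simp only [Bool.or_eq_true, decide_eq_true_eq, Int.ediv_one, dig1, dig2, dig3, dig4]
  split_ifs with h0 h1 h2 h3 h4 <;> simp_all
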